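-- pv_equiv track=rewrite | github.com/RLG-Media/RLG-DATA | shared/aaaaaaaaaaaaa RLG Supper Tool Files/rlg_super_tool.py | _parse_calendar
-- ===== SOURCE A (Python) =====
-- from typing import Dict, List, Any, Optional, Tuple
--
-- def _parse_calendar(raw_text: str) -> Dict:
--     """Convert LLM response to structured calendar"""
--     calendar = {}
--     current_day = None
--     for line in raw_text.split('\n'):
--         if line.lower().startswith('day'):
--             current_day = line.strip()
--             calendar[current_day] = []
--         elif current_day and line.strip():
--             calendar[current_day].append(line.strip())
--     return calendar
-- ===== SOURCE B (Python) =====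
-- def _parse_calendar(raw_text: str):
--     """Two-pass rewrite: first chunk the lines into (header, body) segments,
--     then fold the segments into the calendar dict (later duplicate header wins)."""
--     lines = raw_text.split('\n')
--     n = len(lines)
--     i = 0
--     # drop everything before the first header line
--     while i < n and not lines[i].lower().startswith('day'):
--         i += 1
--     segments = []
--     while i < n:
--         header = lines[i].strip()
--         i += 1
--         body = []
--         while i < n and not lines[i].lower().startswith('day'):
--             body.append(lines[i])
--             i += 1
--         segments.append((header, body))
--     calendar = {}
--     for header, body in segments:
--         calendar[header] = [s.strip() for s in body if s.strip()]
--     return calendar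
-- ===== Notes on version B (the rewrite author's own statement) =====
-- stated objective: alternative
-- what changed: Replaces the single loop that threads current_day and mutates the dict line by line with a two-pass decomposition: a chunking pass that splits the lines into (header, body) segments, then a fold that formats each body and inserts it, with a later duplicate header overwriting an earlier one.
import Mathlib
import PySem

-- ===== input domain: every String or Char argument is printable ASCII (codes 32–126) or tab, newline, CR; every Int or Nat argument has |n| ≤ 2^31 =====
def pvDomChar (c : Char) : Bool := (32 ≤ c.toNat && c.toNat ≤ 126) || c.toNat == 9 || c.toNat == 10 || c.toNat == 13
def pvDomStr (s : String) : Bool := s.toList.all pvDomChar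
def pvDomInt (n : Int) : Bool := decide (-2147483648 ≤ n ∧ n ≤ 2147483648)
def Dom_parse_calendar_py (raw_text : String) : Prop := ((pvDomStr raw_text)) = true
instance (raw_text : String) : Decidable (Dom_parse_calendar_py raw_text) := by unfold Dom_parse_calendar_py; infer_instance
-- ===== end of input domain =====

-- ===== PORT A =====
-- B re-decomposes A's single stateful loop into a chunking pass plus a fold over segments.
def pvAStep (st : PySem.Dict String (List String) × Option String) (line : String) :
    PySem.Dict String (List String) × Option String :=
  if PySem.Str.startswith (PySem.Str.lower line) "day" then
    let d := PySem.Str.strip line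
    (st.1.insert d [], some d)
  else
    match st.2 with
    | some d =>
        if d ≠ "" ∧ PySem.Str.strip line ≠ "" then
          (st.1.modify d [] (fun b => b ++ [PySem.Str.strip line]), some d)
        else st
    | none => st

def parse_calendar_py (raw_text : String) : List (String × List String) :=
  let lines := (PySem.Str.split? raw_text "\n").getD []
  ((lines.foldl pvAStep (PySem.Dict.empty, none)).1).items

-- ===== PORT B =====
def pvIsHeader (line : String) : Bool :=
  PySem.Str.startswith (PySem.Str.lower line) "day"

-- inner while loop of Source B: collect body lines up to (excluding) the next header
def pvTakeBody : List String → List String × List String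
  | [] => ([], [])
  | l :: ls =>
    if pvIsHeader l then ([], l :: ls)
    else
      let r := pvTakeBody ls
      (l :: r.1, r.2)

theorem pvTakeBody_len (ls : List String) : (pvTakeBody ls).2.length ≤ ls.length := by
  induction ls with
  | nil => simp [pvTakeBody]
  | cons l ls ih =>
    simp only [pvTakeBody]
    split
    · simp
    · simpa using Nat.le_succ_of_le ih

-- chunking pass of Source B (outer while loops, incl. the pre-header skip)
def pvSegs : List String → List (String × List String)
  | [] => []
  | l :: ls =>
    if pvIsHeader l then
      (PySem.Str.strip l, (pvTakeBody ls).1) :: pvSegs (pvTakeBody ls).2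
    else pvSegs ls
termination_by ls => ls.length
decreasing_by
  · exact Nat.lt_succ_of_le (pvTakeBody_len ls)
  · exact Nat.lt_succ_of_le (Nat.le_refl _)

-- the comprehension [s.strip() for s in body if s.strip()]
def pvFormat (body : List String) : List String :=
  (body.filter (fun s => PySem.Str.strip s ≠ "")).map PySem.Str.strip

def parse_calendar_py_alt (raw_text : String) : List (String × List String) :=
  let lines := (PySem.Str.split? raw_text "\n").getD []
  ((pvSegs lines).foldl
    (fun cal hb => cal.insert hb.1 (pvFormat hb.2)) PySem.Dict.empty).items
-- ===== PRECONDITION & SPEC =====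
def Spec_parse_calendar_py (raw_text : String) (out : List (String × List String)) : Prop := out = parse_calendar_py_alt raw_text
instance (raw_text : String) (out : List (String × List String)) : Decidable (Spec_parse_calendar_py raw_text out) := by unfold Spec_parse_calendar_py; infer_instance

-- ===== CLAIM (what is proved, stated in full; the proofs are below) =====
def Claim_equal_parse_calendar_py : Prop := ∀ (raw_text : String), Dom_parse_calendar_py raw_text → Spec_parse_calendar_py raw_text (parse_calendar_py raw_text)

-- ===== LEMMAS AND PROOFS =====

def pvBStep (cal : PySem.Dict String (List String)) (hb : String × List String) :
    PySem.Dict String (List String) :=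
  cal.insert hb.1 (pvFormat hb.2)

theorem pv_modify_insert (cal : PySem.Dict String (List String)) (d : String)
    (v : List String) (f : List String → List String) :
    (cal.insert d v).modify d [] f = cal.insert d (f v) := by
  simp [PySem.Dict.modify, PySem.Dict.getD_insert_self, PySem.Dict.insert_insert_self]

theorem pv_not_space_of_lower_d (c : Char) (h : PySem.Chars.lowerChar c = 'd') :
    PySem.Chars.isspace c = false := by
  by_cases hu : PySem.Chars.isupper c = true
  · simp only [PySem.Chars.isupper, Bool.and_eq_true, decide_eq_true_eq, Char.le_def,
      UInt32.le_iff_toNat_le] at hu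
    have hA : ('A').val.toNat = 65 := rfl
    have hZ : ('Z').val.toNat = 90 := rfl
    rw [hA] at hu; rw [hZ] at hu
    simp only [PySem.Chars.isspace, Char.toNat, Bool.or_eq_false_iff, Bool.and_eq_false_iff,
      decide_eq_false_iff_not]
    omega
  · simp only [PySem.Chars.lowerChar, hu, Bool.false_eq_true, ite_false] at h
    subst h
    decide

theorem pv_header_strip_ne (l : String) (h : pvIsHeader l = true) :
    PySem.Str.strip l ≠ "" := by
  intro he
  have htl : PySem.Chars.strip l.toList = [] := by
    have h2 := congrArg String.toList he
    simpa [PySem.Str.toList_strip] using h2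
  have hp : ['d', 'a', 'y'] <+: PySem.Chars.lower l.toList := by
    rw [pvIsHeader, PySem.Str.startswith_eq] at h
    have h3 := (PySem.Chars.startswith_iff _ _).mp h
    simpa [PySem.Str.toList_lower] using h3
  cases hl : l.toList with
  | nil => rw [hl] at hp; simp [PySem.Chars.lower] at hp
  | cons c t =>
    rw [hl] at hp htl
    have hc : PySem.Chars.lowerChar c = 'd' := by
      obtain ⟨r, hr⟩ := hp
      simp only [PySem.Chars.lower, List.map_cons] at hr
      exact (List.cons_eq_cons.mp hr.symm).1
    have hns : PySem.Chars.isspace c = false := pv_not_space_of_lower_d c hc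
    simp only [PySem.Chars.strip, PySem.Chars.lstrip, List.dropWhile_cons, hns,
      Bool.false_eq_true, ite_false, PySem.Chars.rstrip, List.reverse_eq_nil_iff] at htl
    have := List.dropWhile_eq_nil_iff.mp htl c (by simp)
    rw [hns] at this
    exact Bool.false_ne_true this

theorem pv_body (lines : List String) :
    ∀ (cal : PySem.Dict String (List String)) (d : String) (acc : List String), d ≠ "" →
      (lines.foldl pvAStep (cal.insert d acc, some d)).1 =
        (pvSegs (pvTakeBody lines).2).foldl pvBStep
          (cal.insert d (acc ++ pvFormat (pvTakeBody lines).1)) := by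
  induction lines with
  | nil => intro cal d acc _; simp [pvTakeBody, pvSegs, pvFormat]
  | cons l ls ih =>
    intro cal d acc hd
    by_cases hh : pvIsHeader l = true
    · have hs := pv_header_strip_ne l hh
      simp only [pvTakeBody, hh, if_pos, List.foldl_cons]
      rw [show pvAStep (cal.insert d acc, some d) l =
            ((cal.insert d acc).insert (PySem.Str.strip l) [], some (PySem.Str.strip l)) by
            simp [pvAStep, pvIsHeader] at hh ⊢; simp [hh]]
      rw [ih (cal.insert d acc) (PySem.Str.strip l) [] hs]
      simp only [pvSegs, hh, if_pos, List.foldl_cons, pvBStep, pvFormat, List.filter_nil,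
        List.map_nil, List.append_nil, List.nil_append]
    · by_cases hb : PySem.Str.strip l = ""
      · simp only [pvTakeBody, hh, List.foldl_cons]
        rw [show pvAStep (cal.insert d acc, some d) l = (cal.insert d acc, some d) by
              simp [pvAStep, pvIsHeader] at hh ⊢; simp [hh, hb]]
        rw [ih cal d acc hd]
        simp [pvFormat, hb]
      · simp only [pvTakeBody, hh, List.foldl_cons]
        rw [show pvAStep (cal.insert d acc, some d) l =
              (cal.insert d (acc ++ [PySem.Str.strip l]), some d) by
              simp [pvAStep, pvIsHeader] at hh ⊢
              simp [hh, hd, hb, pv_modify_insert]]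
        rw [ih cal d (acc ++ [PySem.Str.strip l]) hd]
        simp [pvFormat, hb]

theorem pv_none (lines : List String) :
    ∀ (cal : PySem.Dict String (List String)),
      (lines.foldl pvAStep (cal, none)).1 = (pvSegs lines).foldl pvBStep cal := by
  induction lines with
  | nil => intro cal; simp [pvSegs]
  | cons l ls ih =>
    intro cal
    by_cases hh : pvIsHeader l = true
    · have hs := pv_header_strip_ne l hh
      simp only [List.foldl_cons]
      rw [show pvAStep (cal, none) l =
            (cal.insert (PySem.Str.strip l) [], some (PySem.Str.strip l)) by
            simp [pvAStep, pvIsHeader] at hh ⊢; simp [hh]]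
      rw [pv_body ls cal (PySem.Str.strip l) [] hs]
      simp only [pvSegs, hh, if_pos, List.foldl_cons, pvBStep, List.nil_append]
    · simp only [List.foldl_cons]
      rw [show pvAStep (cal, none) l = (cal, none) by
            simp [pvAStep, pvIsHeader] at hh ⊢; simp [hh]]
      rw [ih cal]
      simp [pvSegs, hh]

-- ===== VERDICT (by name: the statement is the Claim_ definition above) =====
theorem parse_calendar_py_spec : Claim_equal_parse_calendar_py := by
  intro raw_text _
  unfold Spec_parse_calendar_py parse_calendar_py parse_calendar_py_alt
  exact congrArg PySem.Dict.items (pv_none _ _)
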